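-- pv_equiv track=rewrite | github.com/mpac123/RangeFiltering | bench/workload-gen/visualize_tree_tikz.py | generate_node_color
-- ===== SOURCE A (Python) =====
-- def generate_node(words, pos):
--     current = None
--     new_words = []
--     res = ""
--     for word in words:
--         if pos >= len(word):
--             continue
--         if current == None or word[pos] == current:
--             current = word[pos]
--             new_words.append(word)
--             continue
--         res += "[" + current + " " + generate_node(new_words, pos+1) + " ]"
--         current = word[pos]
--         new_words = []
--         new_words.append(word)
--     if current != None:
--         res += "[" + current + " " + generate_node(new_words, pos+1) + " ]"
--     return res
--
-- def generate_node_color(words, pos, input, queries):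
--     current = None
--     new_words = []
--     res = ""
--     for word in words:
--         if pos >= len(word):
--             continue
--         if current == None or word[pos] == current:
--             current = word[pos]
--             new_words.append(word)
--             continue
--         res += "[" + current + " " + generate_node(new_words, pos+1) + " ]"
--         current = word[pos]
--         new_words = []
--         new_words.append(word)
--     if current != None:
--         res += "[" + current + " " + generate_node(new_words, pos+1) + " ]"
--     return res
-- ===== SOURCE B (Python) =====
-- # B: filter, then explicitly group consecutive words by the char at pos into (char, group)
-- # runs (built right-to-left), then render each group; no current/new_words flush state.
-- def _groupby(words, pos):
--     groups = []
--     for w in reversed(words):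
--         if groups and groups[0][0] == w[pos]:
--             groups[0] = (groups[0][0], [w] + groups[0][1])
--         else:
--             groups.insert(0, (w[pos], [w]))
--     return groups
--
-- def _node(words, pos):
--     groups = _groupby([w for w in words if pos < len(w)], pos)
--     res = ""
--     for c, g in groups:
--         res += "[" + c + " " + _node(g, pos + 1) + " ]"
--     return res
--
-- def generate_node_color(words, pos, input, queries):
--     return _node(words, pos)
-- ===== Notes on version B (the rewrite author's own statement) =====
-- stated objective: alternative
-- what changed: B replaces A's single-pass flush-on-change accumulator loop (current/new_words/res state) by filtering out exhausted words, explicitly grouping the rest into consecutive (char, group) runs built right-to-left, and then rendering each run with a recursive call.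
import Mathlib
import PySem

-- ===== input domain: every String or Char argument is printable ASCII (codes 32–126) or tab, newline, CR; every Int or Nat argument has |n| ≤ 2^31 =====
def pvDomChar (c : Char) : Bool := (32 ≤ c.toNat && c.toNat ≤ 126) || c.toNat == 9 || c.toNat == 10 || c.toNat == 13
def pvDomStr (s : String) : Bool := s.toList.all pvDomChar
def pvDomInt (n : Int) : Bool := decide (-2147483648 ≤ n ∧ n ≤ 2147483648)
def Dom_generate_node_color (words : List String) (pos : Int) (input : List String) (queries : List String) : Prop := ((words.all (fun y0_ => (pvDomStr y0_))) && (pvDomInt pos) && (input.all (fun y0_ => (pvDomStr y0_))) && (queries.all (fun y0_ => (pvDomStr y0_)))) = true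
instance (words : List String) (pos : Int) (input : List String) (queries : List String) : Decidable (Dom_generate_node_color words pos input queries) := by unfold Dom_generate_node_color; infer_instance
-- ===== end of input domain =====

-- B replaces A's flush-on-change accumulator loop by: filter, group consecutive words by the
-- char at pos into explicit (char, group) runs, then render each run (objective: alternative).


-- ===== PORT A =====
-- fuel bound used only as a termination guard by both ports (the Python functions recurse on pos+1
-- and stop once pos reaches every word's length)
def pvMaxLen (ws : List String) : Int := ws.foldl (fun m w => max m (PySem.Str.len w)) 0
def pvFuel (ws : List String) (pos : Int) : Nat := (pvMaxLen ws - pos).toNat + 1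

mutual
/-- port of A's helper generate_node (fuel is only the termination guard) -/
def pvGenNodeA : Nat → List String → Int → String
  | 0, _, _ => ""
  | fuel+1, words, pos => pvLoopA fuel pos words none [] ""
  termination_by f _ _ => (f, 0)
/-- A's for-loop over words with state (current, new_words, res); `pyGet? w pos = none` covers
Python's `pos >= len(word)` skip together with the IndexError inputs excluded by Pre_ -/
def pvLoopA : Nat → Int → List String → Option Char → List String → String → String
  | fuel, pos, [], current, nw, res =>
    match current with
    | none => res
    | some c => res ++ "[" ++ String.singleton c ++ " " ++ pvGenNodeA fuel nw (pos + 1) ++ " ]"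
  | fuel, pos, w :: ws, current, nw, res =>
    match PySem.Str.pyGet? w pos with
    | none => pvLoopA fuel pos ws current nw res
    | some ch =>
      match current with
      | none => pvLoopA fuel pos ws (some ch) (nw ++ [w]) res
      | some c =>
        if ch == c then pvLoopA fuel pos ws (some ch) (nw ++ [w]) res
        else pvLoopA fuel pos ws (some ch) [w]
          (res ++ "[" ++ String.singleton c ++ " " ++ pvGenNodeA fuel nw (pos + 1) ++ " ]")
  termination_by f _ ws _ _ _ => (f, ws.length + 1)
end

def generate_node_color (words : List String) (pos : Int) (input : List String) (queries : List String) : String :=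
  pvLoopA (pvFuel words pos) pos words none [] ""

-- ===== PORT B =====
-- Source B's _groupby: right-to-left loop merging a word into the front group when keys match;
-- `(pyGet? w pos).isSome` is Source B's `pos < len(w)` filter (same remark about excluded IndexError inputs)
def pvValid (pos : Int) (w : String) : Bool := (PySem.Str.pyGet? w pos).isSome

def pvGroupbyB (pos : Int) (ws : List String) : List (Option Char × List String) :=
  ws.foldr (fun w groups =>
    match groups with
    | (k, g) :: rest =>
      if PySem.Str.pyGet? w pos == k then (k, w :: g) :: rest
      else (PySem.Str.pyGet? w pos, [w]) :: (k, g) :: rest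
    | [] => [(PySem.Str.pyGet? w pos, [w])]) []

/-- Source B's _node: filter, group, render each (char, group) run -/
def pvNodeB : Nat → List String → Int → String
  | 0, _, _ => ""
  | fuel+1, words, pos =>
    (pvGroupbyB pos (words.filter (pvValid pos))).foldl
      (fun acc p => acc ++ ("[" ++ (match p.1 with | some c => String.singleton c | none => "") ++ " " ++ pvNodeB fuel p.2 (pos + 1) ++ " ]")) ""
termination_by fuel _ _ => fuel

def generate_node_color_alt (words : List String) (pos : Int) (input : List String) (queries : List String) : String :=
  pvNodeB (pvFuel words pos + 1) words pos

-- ===== PRECONDITION & SPEC =====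
-- Pre_ excludes exactly the inputs where Python raises IndexError: a negative pos reaching
-- beyond the start of some word (pos < -len(w), including empty words); A returns everywhere else.
def Pre_generate_node_color (words : List String) (pos : Int) (input : List String) (queries : List String) : Prop :=
  pos < 0 → ∀ w ∈ words, -pos ≤ PySem.Str.len w
instance (words : List String) (pos : Int) (input : List String) (queries : List String) : Decidable (Pre_generate_node_color words pos input queries) := by unfold Pre_generate_node_color; infer_instance

def pvWitness_generate_node_color : List String × Int × List String × List String :=
  (["ab", "ad", "b"], 0, [], [])

def Spec_generate_node_color (words : List String) (pos : Int) (input : List String) (queries : List String) (out : String) : Prop := out = generate_node_color_alt words pos input queries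
instance (words : List String) (pos : Int) (input : List String) (queries : List String) (out : String) : Decidable (Spec_generate_node_color words pos input queries out) := by unfold Spec_generate_node_color; infer_instance

-- ===== CLAIM (what is proved, stated in full; the proofs are below) =====
def Claim_equal_generate_node_color : Prop := ∀ (words : List String) (pos : Int) (input : List String) (queries : List String), Dom_generate_node_color words pos input queries → Pre_generate_node_color words pos input queries → Spec_generate_node_color words pos input queries (generate_node_color words pos input queries)

-- ===== LEMMAS AND PROOFS =====

/-- rendering of a group list with A's recursion at a fixed fuel -/
def pvRender (fuel : Nat) (pos : Int) (gs : List (Option Char × List String)) : String :=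
  gs.foldl (fun acc p => acc ++ ("[" ++ (match p.1 with | some c => String.singleton c | none => "") ++ " " ++ pvGenNodeA fuel p.2 (pos + 1) ++ " ]")) ""

/-- effect of prepending a run of equal-key words to the grouping -/
def pvPushRun (c : Char) (nw : List String) (gs : List (Option Char × List String)) : List (Option Char × List String) :=
  match gs with
  | (k, g) :: rest => if (some c : Option Char) == k then (k, nw ++ g) :: rest else (some c, nw) :: (k, g) :: rest
  | [] => [(some c, nw)]

theorem pvFoldl_str_shift (f : Option Char × List String → String) :
    ∀ (l : List (Option Char × List String)) (acc : String),
      l.foldl (fun a p => a ++ f p) acc = acc ++ l.foldl (fun a p => a ++ f p) "" := by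
  intro l
  induction l with
  | nil => intro acc; simp
  | cons p l ih =>
    intro acc
    simp only [List.foldl_cons]
    rw [ih (acc ++ f p), ih ("" ++ f p), String.empty_append, String.append_assoc]

theorem pvRender_nil (fuel : Nat) (pos : Int) : pvRender fuel pos [] = "" := rfl

theorem pvRender_cons (fuel : Nat) (pos : Int) (p : Option Char × List String) (gs : List (Option Char × List String)) :
    pvRender fuel pos (p :: gs) =
      ("[" ++ (match p.1 with | some c => String.singleton c | none => "") ++ " " ++ pvGenNodeA fuel p.2 (pos + 1) ++ " ]") ++ pvRender fuel pos gs := by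
  unfold pvRender
  simp only [List.foldl_cons]
  rw [pvFoldl_str_shift, String.empty_append]

theorem pvGroupby_run (pos : Int) (c : Char) :
    ∀ (nw l : List String), nw ≠ [] → (∀ w ∈ nw, PySem.Str.pyGet? w pos = some c) →
      pvGroupbyB pos (nw ++ l) = pvPushRun c nw (pvGroupbyB pos l) := by
  intro nw
  induction nw with
  | nil => intro l h; exact absurd rfl h
  | cons w nw ih =>
    intro l _ hkeys
    have hw : PySem.Str.pyGet? w pos = some c := hkeys w (by simp)
    have hw' : PySem.List.pyGet? w.toList pos = some c := by simpa using hw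
    match nw, ih with
    | [], _ =>
      show pvGroupbyB pos (w :: l) = _
      unfold pvGroupbyB pvPushRun
      simp only [List.foldr_cons, hw]
      rcases hgl : List.foldr _ ([] : List (Option Char × List String)) l with _ | ⟨⟨k, g⟩, rest⟩ <;> simp [hw']
    | w' :: nw', ih =>
      have hrec := ih l (by simp) (fun x hx => hkeys x (List.mem_cons_of_mem _ hx))
      show pvGroupbyB pos (w :: ((w' :: nw') ++ l)) = _
      have hstep : pvGroupbyB pos (w :: ((w' :: nw') ++ l)) =
          (match pvGroupbyB pos ((w' :: nw') ++ l) with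
           | (k, g) :: rest =>
             if PySem.Str.pyGet? w pos == k then (k, w :: g) :: rest
             else (PySem.Str.pyGet? w pos, [w]) :: (k, g) :: rest
           | [] => [(PySem.Str.pyGet? w pos, [w])]) := rfl
      rw [hstep, hrec]
      unfold pvPushRun
      rcases pvGroupbyB pos l with _ | ⟨⟨k, g⟩, rest⟩
      · simp [hw']
      · by_cases hk : (some c : Option Char) = k
        · subst hk; simp [hw']
        · simp [hw', hk]

theorem pvGroupby_head_key (pos : Int) (w : String) (c : Char) (l : List String)
    (hw : PySem.Str.pyGet? w pos = some c) :
    ∃ g rest, pvGroupbyB pos (w :: l) = (some c, g) :: rest := by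
  have h := pvGroupby_run pos c [w] l (by simp) (by simpa using hw)
  simp only [List.singleton_append] at h
  rw [h]
  unfold pvPushRun
  rcases pvGroupbyB pos l with _ | ⟨⟨k, g⟩, rest⟩
  · exact ⟨[w], [], rfl⟩
  · by_cases hk : (some c : Option Char) = k
    · subst hk; exact ⟨[w] ++ g, rest, by simp⟩
    · exact ⟨[w], (k, g) :: rest, by simp [hk]⟩

theorem pvAppend_push (a b : String) (c : Char) : (a ++ b).push c = a ++ b.push c := by
  rw [← String.append_singleton, ← String.append_singleton, String.append_assoc]

theorem pvLoopA_run (fuel : Nat) (pos : Int) :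
    ∀ (ws nw : List String) (c : Char) (res : String), nw ≠ [] →
      (∀ w ∈ nw, PySem.Str.pyGet? w pos = some c) →
      pvLoopA fuel pos ws (some c) nw res =
        res ++ pvRender fuel pos (pvGroupbyB pos (nw ++ ws.filter (pvValid pos))) := by
  intro ws
  induction ws with
  | nil =>
    intro nw c res hne hkeys
    rw [show pvLoopA fuel pos [] (some c) nw res =
        res ++ "[" ++ String.singleton c ++ " " ++ pvGenNodeA fuel nw (pos + 1) ++ " ]" from by
      simp [pvLoopA]]
    simp only [List.filter_nil, List.append_nil]
    rw [show nw = nw ++ [] from by simp, pvGroupby_run pos c nw [] hne hkeys]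
    unfold pvPushRun pvGroupbyB
    simp only [List.foldr_nil, List.append_nil]
    rw [pvRender_cons, pvRender_nil]
    simp [String.append_assoc, pvAppend_push]
  | cons w ws ih =>
    intro nw c res hne hkeys
    rcases hk : PySem.Str.pyGet? w pos with _ | ch
    · have hk' : PySem.List.pyGet? w.toList pos = none := by simpa using hk
      rw [show pvLoopA fuel pos (w :: ws) (some c) nw res = pvLoopA fuel pos ws (some c) nw res from by
        simp [pvLoopA, hk']]
      rw [ih nw c res hne hkeys]
      have hv : pvValid pos w = false := by simp [pvValid, hk']
      simp only [List.filter_cons, hv, Bool.false_eq_true, if_false]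
    · have hk' : PySem.List.pyGet? w.toList pos = some ch := by simpa using hk
      have hv : pvValid pos w = true := by simp [pvValid, hk']
      have hfil : (w :: ws).filter (pvValid pos) = w :: ws.filter (pvValid pos) := by
        simp only [List.filter_cons, hv, if_true]
      by_cases hcc : ch = c
      · subst hcc
        rw [show pvLoopA fuel pos (w :: ws) (some ch) nw res = pvLoopA fuel pos ws (some ch) (nw ++ [w]) res from by
          simp [pvLoopA, hk, hk']]
        rw [ih (nw ++ [w]) ch res (by simp) (by
          intro x hx
          rcases List.mem_append.mp hx with h | h
          · exact hkeys x h
          · simp at h; subst h; exact hk)]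
        rw [hfil]
        simp [List.append_assoc]
      · rw [show pvLoopA fuel pos (w :: ws) (some c) nw res =
            pvLoopA fuel pos ws (some ch) [w]
              (res ++ "[" ++ String.singleton c ++ " " ++ pvGenNodeA fuel nw (pos + 1) ++ " ]") from by
          simp [pvLoopA, hk, hk', hcc]]
        rw [ih [w] ch _ (by simp) (by simpa using hk)]
        rw [hfil, List.singleton_append]
        rw [pvGroupby_run pos c nw _ hne hkeys]
        obtain ⟨g, rest, hg⟩ := pvGroupby_head_key pos w ch (ws.filter (pvValid pos)) hk
        rw [hg]
        have hpush : pvPushRun c nw ((some ch, g) :: rest) = (some c, nw) :: (some ch, g) :: rest := by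
          simp [pvPushRun, Ne.symm hcc]
        rw [hpush]
        simp [pvRender_cons, String.append_assoc, pvAppend_push]

theorem pvLoopA_start (fuel : Nat) (pos : Int) :
    ∀ ws : List String,
      pvLoopA fuel pos ws none [] "" =
        pvRender fuel pos (pvGroupbyB pos (ws.filter (pvValid pos))) := by
  intro ws
  induction ws with
  | nil => simp [pvLoopA, pvRender, pvGroupbyB]
  | cons w ws ih =>
    rcases hk : PySem.Str.pyGet? w pos with _ | ch
    · have hk' : PySem.List.pyGet? w.toList pos = none := by simpa using hk
      rw [show pvLoopA fuel pos (w :: ws) none [] "" = pvLoopA fuel pos ws none [] "" from by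
        simp [pvLoopA, hk']]
      rw [ih]
      have hv : pvValid pos w = false := by simp [pvValid, hk']
      simp only [List.filter_cons, hv, Bool.false_eq_true, if_false]
    · have hk' : PySem.List.pyGet? w.toList pos = some ch := by simpa using hk
      rw [show pvLoopA fuel pos (w :: ws) none [] "" = pvLoopA fuel pos ws (some ch) [w] "" from by
        simp [pvLoopA, hk, hk']]
      rw [pvLoopA_run fuel pos ws [w] ch "" (by simp) (by simpa using hk)]
      have hv : pvValid pos w = true := by simp [pvValid, hk']
      simp only [List.filter_cons, hv, if_true, List.singleton_append, String.empty_append]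

theorem pvMain (fuel : Nat) : ∀ (words : List String) (pos : Int),
    pvGenNodeA fuel words pos = pvNodeB fuel words pos := by
  induction fuel with
  | zero => intro words pos; simp [pvGenNodeA, pvNodeB]
  | succ fuel ih =>
    intro words pos
    rw [show pvGenNodeA (fuel + 1) words pos = pvLoopA fuel pos words none [] "" from by
      simp [pvGenNodeA]]
    rw [pvLoopA_start fuel pos words]
    rw [show pvNodeB (fuel + 1) words pos =
        (pvGroupbyB pos (words.filter (pvValid pos))).foldl
          (fun acc p => acc ++ ("[" ++ (match p.1 with | some c => String.singleton c | none => "") ++ " " ++ pvNodeB fuel p.2 (pos + 1) ++ " ]")) "" from by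
      simp [pvNodeB]]
    unfold pvRender
    simp only [ih]

-- ===== VERDICT (by name: the statement is the Claim_ definition above) =====
theorem generate_node_color_spec : Claim_equal_generate_node_color := by
  intro words pos input queries _ _
  unfold Spec_generate_node_color generate_node_color generate_node_color_alt
  rw [show pvLoopA (pvFuel words pos) pos words none [] "" = pvGenNodeA (pvFuel words pos + 1) words pos from by
    simp [pvGenNodeA]]
  exact pvMain (pvFuel words pos + 1) words pos
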